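-- pv_equiv track=rewrite | github.com/unholyparrot/ont-lc-filter | metrics.py | get_wanted_regions
-- ===== SOURCE A (Python) =====
-- def get_wanted_regions(sequence_length, dont_want_list):
--     """
--     Get regions of the sequence that are not in the `dont_want_list`.
--
--     Args:
--         sequence_length (int): Total length of the sequence.
--         dont_want_list (list): List of [start, end] ranges to exclude.
--
--     Returns:
--         list: List of [start, end] ranges for wanted regions.
--     """
--     # Sort the excluded ranges by start position
--     dont_want_list.sort(key=lambda x: x[0])
--
--     # Initialize the list of wanted regions
--     wanted_regions = []
--     prev_end = 0  # Start from the beginning of the sequence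
--
--     # Iterate through the excluded ranges and find the wanted regions
--     for start, end in dont_want_list:
--         if start > prev_end:
--             # Add the region before the excluded range
--             wanted_regions.append([prev_end, start - 1])
--         prev_end = max(prev_end, end + 1)  # Update the end of the last excluded range
--
--     # Add the region after the last excluded range
--     if prev_end < sequence_length:
--         wanted_regions.append([prev_end, sequence_length - 1])
--
--     return wanted_regions
-- ===== SOURCE B (Python) =====
-- def get_wanted_regions(sequence_length, dont_want_list):
--     """Complement of the excluded ranges: merge the sorted ranges into disjoint
--     blocks first, then emit the gaps between blocks (two phases instead of A's
--     single sweep). Sorts dont_want_list in place, like A."""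
--     dont_want_list.sort(key=lambda x: x[0])
--
--     # Phase 1: coalesce overlapping or adjacent ranges into blocks.
--     blocks = []
--     cur = None  # current pending block [start, end]
--     for start, end in dont_want_list:
--         if cur is None:
--             cur = [start, end]
--         elif start <= cur[1] + 1:
--             if end > cur[1]:
--                 cur[1] = end
--         else:
--             blocks.append(cur)
--             cur = [start, end]
--     if cur is not None:
--         blocks.append(cur)
--
--     # Phase 2: complement of the blocks.
--     regions = []
--     prev = 0
--     for start, end in blocks:
--         if start > prev:
--             regions.append([prev, start - 1])
--         prev = max(prev, end + 1)
--     if prev < sequence_length: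
--         regions.append([prev, sequence_length - 1])
--     return regions
-- ===== Notes on version B (the rewrite author's own statement) =====
-- stated objective: alternative
-- what changed: A does one sweep with a running prev_end over the sorted ranges; B first coalesces the sorted ranges into disjoint blocks (merge-intervals phase) and then emits the complement of those blocks in a second pass.
import Mathlib
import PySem

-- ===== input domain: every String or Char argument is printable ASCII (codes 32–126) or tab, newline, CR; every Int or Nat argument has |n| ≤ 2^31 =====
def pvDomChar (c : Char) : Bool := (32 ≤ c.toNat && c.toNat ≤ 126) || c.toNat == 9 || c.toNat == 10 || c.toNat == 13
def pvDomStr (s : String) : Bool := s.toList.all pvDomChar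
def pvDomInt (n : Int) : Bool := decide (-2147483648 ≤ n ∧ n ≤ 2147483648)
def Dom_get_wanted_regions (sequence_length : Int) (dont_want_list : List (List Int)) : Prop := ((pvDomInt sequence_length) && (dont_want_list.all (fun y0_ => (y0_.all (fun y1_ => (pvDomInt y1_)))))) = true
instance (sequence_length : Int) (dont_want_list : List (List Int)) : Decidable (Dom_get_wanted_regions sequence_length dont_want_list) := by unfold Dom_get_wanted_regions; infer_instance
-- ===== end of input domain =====

-- B replaces A's single prev_end sweep by merge-the-blocks-then-complement (alternative
-- decomposition, same cost). Both Pythons sort dont_want_list IN PLACE (same mutation);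
-- the equivalence proved here is about the return value.

-- ===== PORT A =====
-- the body of A's `for start, end in dont_want_list` loop; non-pair rows are outside Pre_
def pvSweep (st : List (List Int) × Int) (r : List Int) : List (List Int) × Int :=
  match r with
  | [s, e] => (if s > st.2 then st.1 ++ [[st.2, s - 1]] else st.1, max st.2 (e + 1))
  | _ => st

def get_wanted_regions (sequence_length : Int) (dont_want_list : List (List Int)) : List (List Int) :=
  -- key=lambda x: x[0]; headD 0 equals x[0] on the length-2 rows Pre_ admits
  let sl := PySem.List.sorted dont_want_list (fun x => x.headD 0) false
  let st := sl.foldl pvSweep ([], 0)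
  if st.2 < sequence_length then st.1 ++ [[st.2, sequence_length - 1]] else st.1

-- ===== PORT B =====
-- the body of B's merge loop, state = (blocks, cur); non-pair rows are outside Pre_
def pvMergeStep (st : List (List Int) × Option (Int × Int)) (r : List Int) :
    List (List Int) × Option (Int × Int) :=
  match r, st.2 with
  | [s, e], none => (st.1, some (s, e))
  | [s, e], some (cs, ce) =>
      if s ≤ ce + 1 then (st.1, some (cs, if e > ce then e else ce))
      else (st.1 ++ [[cs, ce]], some (s, e))
  | _, _ => st

-- B's trailing `if cur is not None: blocks.append(cur)`
def pvFinalize (st : List (List Int) × Option (Int × Int)) : List (List Int) :=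
  st.1 ++ (match st.2 with | some (cs, ce) => [[cs, ce]] | none => [])

def get_wanted_regions_alt (sequence_length : Int) (dont_want_list : List (List Int)) : List (List Int) :=
  let sl := PySem.List.sorted dont_want_list (fun x => x.headD 0) false
  let blocks := pvFinalize (sl.foldl pvMergeStep ([], none))
  -- B's complement loop has the same per-element body as A's sweep, hence pvSweep again
  let st := blocks.foldl pvSweep ([], 0)
  if st.2 < sequence_length then st.1 ++ [[st.2, sequence_length - 1]] else st.1

-- ===== PRECONDITION & SPEC =====
-- Pre_ excludes rows that are not [start, end] pairs: there Python A raises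
-- (ValueError on unpacking, IndexError in the sort key for []), it never returns.
def Pre_get_wanted_regions (sequence_length : Int) (dont_want_list : List (List Int)) : Prop :=
  ∀ r ∈ dont_want_list, r.length = 2
instance (sequence_length : Int) (dont_want_list : List (List Int)) : Decidable (Pre_get_wanted_regions sequence_length dont_want_list) := by unfold Pre_get_wanted_regions; infer_instance

def pvWitness_get_wanted_regions : Int × List (List Int) := (10, [[7, 7], [2, 3]])

def Spec_get_wanted_regions (sequence_length : Int) (dont_want_list : List (List Int)) (out : List (List Int)) : Prop := out = get_wanted_regions_alt sequence_length dont_want_list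
instance (sequence_length : Int) (dont_want_list : List (List Int)) (out : List (List Int)) : Decidable (Spec_get_wanted_regions sequence_length dont_want_list out) := by unfold Spec_get_wanted_regions; infer_instance

-- ===== CLAIM (what is proved, stated in full; the proofs are below) =====
def Claim_equal_get_wanted_regions : Prop := ∀ (sequence_length : Int) (dont_want_list : List (List Int)), Dom_get_wanted_regions sequence_length dont_want_list → Pre_get_wanted_regions sequence_length dont_want_list → Spec_get_wanted_regions sequence_length dont_want_list (get_wanted_regions sequence_length dont_want_list)

-- ===== LEMMAS AND PROOFS =====

-- proof-side recursive view of B's merge phase: the blocks produced from a pending block [cs,ce]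
def pvMergeGo (cs ce : Int) : List (List Int) → List (List Int)
  | [] => [[cs, ce]]
  | [s, e] :: rest =>
      if s ≤ ce + 1 then pvMergeGo cs (if e > ce then e else ce) rest
      else [cs, ce] :: pvMergeGo s e rest
  | _ :: rest => pvMergeGo cs ce rest

-- B's fold-with-accumulator merge equals the recursive view
theorem pvFinalize_foldl (l : List (List Int)) : ∀ (bs : List (List Int)) (cs ce : Int),
    pvFinalize (l.foldl pvMergeStep (bs, some (cs, ce))) = bs ++ pvMergeGo cs ce l := by
  induction l with
  | nil => intro bs cs ce; simp [pvFinalize, pvMergeGo]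
  | cons r rest ih =>
    intro bs cs ce
    match r with
    | [] => simpa [pvMergeGo, pvMergeStep] using ih bs cs ce
    | [s] => simpa [pvMergeGo, pvMergeStep] using ih bs cs ce
    | s :: e :: x :: t => simpa [pvMergeGo, pvMergeStep] using ih bs cs ce
    | [s, e] =>
      by_cases h : s ≤ ce + 1
      · simpa [pvMergeGo, pvMergeStep, h] using ih bs cs (if e > ce then e else ce)
      · simpa [pvMergeGo, pvMergeStep, h, List.append_assoc] using ih (bs ++ [[cs, ce]]) s e

-- key commutation: sweeping a list with a pending block already opened equals
-- sweeping the merged blocks of that list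
theorem pvSweep_mergeGo (l : List (List Int)) : ∀ (cs ce : Int) (st : List (List Int) × Int),
    l.foldl pvSweep (pvSweep st [cs, ce]) = (pvMergeGo cs ce l).foldl pvSweep st := by
  induction l with
  | nil => intro cs ce st; simp [pvMergeGo]
  | cons r rest ih =>
    intro cs ce st
    match r with
    | [] => simpa [pvMergeGo, pvSweep] using ih cs ce st
    | [s] => simpa [pvMergeGo, pvSweep] using ih cs ce st
    | s :: e :: x :: t => simpa [pvMergeGo, pvSweep] using ih cs ce st
    | [s, e] =>
      by_cases h : s ≤ ce + 1
      · have hstate : pvSweep (pvSweep st [cs, ce]) [s, e]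
            = pvSweep st [cs, if e > ce then e else ce] := by
          simp only [pvSweep]
          have hng : ¬ s > max st.2 (ce + 1) := by omega
          rw [if_neg hng, Prod.mk.injEq]
          refine ⟨rfl, ?_⟩
          split_ifs with he <;> omega
        rw [pvMergeGo, if_pos h, ← ih cs (if e > ce then e else ce) st]
        simp [hstate]
      · rw [pvMergeGo, if_neg h]
        simp only [List.foldl_cons]
        rw [← ih s e (pvSweep st [cs, ce])]

-- top-level: A's sweep of any row list equals B's complement sweep of its merged blocks
theorem pvSweep_merge (l : List (List Int)) :
    l.foldl pvSweep ([], 0) = (pvFinalize (l.foldl pvMergeStep ([], none))).foldl pvSweep ([], 0) := by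
  match l with
  | [] => simp [pvFinalize]
  | [] :: rest => simpa [pvMergeStep, pvSweep] using pvSweep_merge rest
  | [s] :: rest => simpa [pvMergeStep, pvSweep] using pvSweep_merge rest
  | (s :: e :: x :: t) :: rest => simpa [pvMergeStep, pvSweep] using pvSweep_merge rest
  | [s, e] :: rest =>
    simp only [List.foldl_cons]
    rw [show pvMergeStep ([], none) [s, e] = (([] : List (List Int)), some (s, e)) from rfl,
        pvFinalize_foldl rest [] s e, List.nil_append, ← pvSweep_mergeGo rest s e ([], 0)]

-- ===== VERDICT (by name: the statement is the Claim_ definition above) =====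
theorem get_wanted_regions_spec : Claim_equal_get_wanted_regions := by
  intro n l _ _
  unfold Spec_get_wanted_regions
  simp only [get_wanted_regions, get_wanted_regions_alt]
  rw [pvSweep_merge]
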